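-- pv_equiv track=rewrite | github.com/qkzk/advent_of_code | 12/rain_risk.py | rotate_waypoint
-- ===== SOURCE A (Python) =====
-- def rotate_waypoint(x, y, waypoint, orientation, amount):
--     nb_quart_turn = amount // 90
--     for _ in range(nb_quart_turn):
--         if orientation == "L":
--             waypoint = [-waypoint[1], waypoint[0]]
--         if orientation == "R":
--             waypoint = [waypoint[1], -waypoint[0]]
--     return waypoint
-- ===== SOURCE B (Python) =====
-- def rotate_waypoint(x, y, waypoint, orientation, amount):
--     if orientation not in ("L", "R") or amount // 90 <= 0:
--         return waypoint
--     a, b = waypoint[0], waypoint[1]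
--     k = (amount // 90) % 4
--     if orientation == "R":
--         k = (-k) % 4
--     return [[a, b], [-b, a], [-a, -b], [b, -a]][k]
-- ===== Notes on version B (the rewrite author's own statement) =====
-- stated objective: alternative
-- what changed: Replaces the quarter-turn-by-quarter-turn rotation loop (amount//90 iterations) with a closed-form table lookup indexed by (amount//90) % 4, mirrored for right turns.
import Mathlib
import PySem

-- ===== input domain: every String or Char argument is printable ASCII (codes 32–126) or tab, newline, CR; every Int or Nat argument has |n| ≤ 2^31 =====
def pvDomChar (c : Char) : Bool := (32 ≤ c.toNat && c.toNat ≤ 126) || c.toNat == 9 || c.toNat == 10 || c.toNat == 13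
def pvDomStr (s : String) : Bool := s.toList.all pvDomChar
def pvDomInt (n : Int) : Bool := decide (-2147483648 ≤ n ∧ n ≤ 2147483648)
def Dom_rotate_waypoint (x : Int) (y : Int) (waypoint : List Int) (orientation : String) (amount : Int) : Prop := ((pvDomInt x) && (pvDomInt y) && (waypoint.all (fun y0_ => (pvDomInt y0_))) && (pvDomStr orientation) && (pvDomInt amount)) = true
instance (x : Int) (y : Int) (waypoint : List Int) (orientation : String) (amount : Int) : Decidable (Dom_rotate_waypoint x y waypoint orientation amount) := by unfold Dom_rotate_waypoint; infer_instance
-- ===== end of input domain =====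

set_option maxHeartbeats 1000000


-- B replaces A's per-quarter-turn rotation loop by a closed-form table lookup on (amount//90) % 4.

-- ===== PORT A =====
def rotate_waypoint (x : Int) (y : Int) (waypoint : List Int) (orientation : String) (amount : Int) : List Int :=
  let nb_quart_turn := PySem.Int.floordiv amount 90
  (PySem.List.pyRange 0 nb_quart_turn 1).foldl
    (fun w _ =>
      let w := if orientation = "L" then
        [-(PySem.List.pyGetD w 1 0), PySem.List.pyGetD w 0 0] else w
      if orientation = "R" then
        [PySem.List.pyGetD w 1 0, -(PySem.List.pyGetD w 0 0)] else w)
    waypoint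

-- ===== PORT B =====
def rotate_waypoint_alt (x : Int) (y : Int) (waypoint : List Int) (orientation : String) (amount : Int) : List Int :=
  if ¬(orientation = "L" ∨ orientation = "R") ∨ PySem.Int.floordiv amount 90 ≤ 0 then
    waypoint
  else
    let a := PySem.List.pyGetD waypoint 0 0
    let b := PySem.List.pyGetD waypoint 1 0
    let k := PySem.Int.mod (PySem.Int.floordiv amount 90) 4
    let k := if orientation = "R" then PySem.Int.mod (-k) 4 else k
    PySem.List.pyGetD [[a, b], [-b, a], [-a, -b], [b, -a]] k []

-- ===== PRECONDITION & SPEC =====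
-- Pre_ excludes exactly the inputs where A raises IndexError: a waypoint with fewer
-- than 2 elements while a real quarter turn (orientation L/R and amount//90 ≥ 1) is applied.
def Pre_rotate_waypoint (x : Int) (y : Int) (waypoint : List Int) (orientation : String) (amount : Int) : Prop :=
  (orientation = "L" ∨ orientation = "R") → 90 ≤ amount → 2 ≤ waypoint.length
instance (x : Int) (y : Int) (waypoint : List Int) (orientation : String) (amount : Int) : Decidable (Pre_rotate_waypoint x y waypoint orientation amount) := by unfold Pre_rotate_waypoint; infer_instance

def pvWitness_rotate_waypoint : Int × Int × List Int × String × Int := (1, 2, [10, 4], "R", 180)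

def Spec_rotate_waypoint (x : Int) (y : Int) (waypoint : List Int) (orientation : String) (amount : Int) (out : List Int) : Prop := out = rotate_waypoint_alt x y waypoint orientation amount
instance (x : Int) (y : Int) (waypoint : List Int) (orientation : String) (amount : Int) (out : List Int) : Decidable (Spec_rotate_waypoint x y waypoint orientation amount out) := by unfold Spec_rotate_waypoint; infer_instance

-- ===== CLAIM (what is proved, stated in full; the proofs are below) =====
def Claim_equal_rotate_waypoint : Prop := ∀ (x : Int) (y : Int) (waypoint : List Int) (orientation : String) (amount : Int), Dom_rotate_waypoint x y waypoint orientation amount → Pre_rotate_waypoint x y waypoint orientation amount → Spec_rotate_waypoint x y waypoint orientation amount (rotate_waypoint x y waypoint orientation amount)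

-- ===== LEMMAS AND PROOFS =====

-- a fold whose body ignores the element is an iterate
theorem pv_foldl_ignore {α β : Type} (f : α → α) (l : List β) (init : α) :
    l.foldl (fun w _ => f w) init = f^[l.length] init := by
  induction l generalizing init with
  | nil => rfl
  | cons h t ih => simp [List.foldl_cons, ih, Function.iterate_succ_apply]

def pvStepL (w : List Int) : List Int :=
  [-(PySem.List.pyGetD w 1 0), PySem.List.pyGetD w 0 0]
def pvStepR (w : List Int) : List Int :=
  [PySem.List.pyGetD w 1 0, -(PySem.List.pyGetD w 0 0)]

theorem pvStepL_pair (p q : Int) : pvStepL [p, q] = [-q, p] := by simp [pvStepL, pysem]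
theorem pvStepR_pair (p q : Int) : pvStepR [p, q] = [q, -p] := by simp [pvStepR, pysem]

theorem pvStepL_iter_mod (m : Nat) (p q : Int) :
    pvStepL^[m] [p, q] = pvStepL^[m % 4] [p, q] := by
  induction m using Nat.strong_induction_on generalizing p q with
  | _ m ih =>
    by_cases h : m < 4
    · rw [Nat.mod_eq_of_lt h]
    · have hm : m = (m - 4) + 4 := by omega
      rw [hm, Function.iterate_add_apply]
      have h4 : pvStepL^[4] [p, q] = [p, q] := by
        simp only [Function.iterate_succ_apply, Function.iterate_zero, id, pvStepL_pair]
        norm_num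
      rw [h4, ih (m - 4) (by omega)]
      congr 1
      omega

theorem pvStepR_iter_mod (m : Nat) (p q : Int) :
    pvStepR^[m] [p, q] = pvStepR^[m % 4] [p, q] := by
  induction m using Nat.strong_induction_on generalizing p q with
  | _ m ih =>
    by_cases h : m < 4
    · rw [Nat.mod_eq_of_lt h]
    · have hm : m = (m - 4) + 4 := by omega
      rw [hm, Function.iterate_add_apply]
      have h4 : pvStepR^[4] [p, q] = [p, q] := by
        simp only [Function.iterate_succ_apply, Function.iterate_zero, id, pvStepR_pair]
        norm_num
      rw [h4, ih (m - 4) (by omega)]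
      congr 1
      omega

-- ===== VERDICT (by name: the statement is the Claim_ definition above) =====
theorem rotate_waypoint_spec : Claim_equal_rotate_waypoint := by
  intro x y waypoint orientation amount _ hpre
  unfold Spec_rotate_waypoint rotate_waypoint rotate_waypoint_alt
  set nb := PySem.Int.floordiv amount 90 with hnb
  by_cases hpos : nb ≤ 0
  · have : PySem.List.pyRange 0 nb 1 = [] := PySem.List.pyRange_one_eq_nil (by omega)
    simp [this, hpos]
  · push_neg at hpos
    have hamt : 90 ≤ amount := by
      have := (PySem.Int.le_floordiv_iff_mul_le (a := amount) (b := 90) (q := 1) (by omega)).mp (by omega)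
      omega
    have hn : nb = ((nb.toNat : Int)) := by omega
    have hn1 : 1 ≤ nb.toNat := by omega
    by_cases hL : orientation = "L"
    · have hlen : 2 ≤ waypoint.length := hpre (Or.inl hL) hamt
      obtain ⟨a, b, t, rfl⟩ : ∃ a b t, waypoint = a :: b :: t := by
        match waypoint, hlen with
        | a :: b :: t, _ => exact ⟨a, b, t, rfl⟩
      have hR : ¬ orientation = "R" := by simp [hL]
      simp only [hL, hR, if_true, if_false,
        if_neg (by simp [hpos.not_ge] : ¬(¬(("L":String) = "L" ∨ ("L":String) = "R") ∨ nb ≤ 0))]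
      have hbody : (PySem.List.pyRange 0 nb 1).foldl (fun w _ => pvStepL w) (a :: b :: t)
          = pvStepL^[nb.toNat] (a :: b :: t) := by
        rw [pv_foldl_ignore]
        congr 1
        rw [PySem.List.length_pyRange_one]; omega
      show (PySem.List.pyRange 0 nb 1).foldl (fun w _ => pvStepL w) (a :: b :: t) = _
      rw [hbody]
      have hfirst : pvStepL (a :: b :: t) = [-b, a] := by simp [pvStepL, pysem]
      obtain ⟨m, hm⟩ : ∃ m, nb.toNat = m + 1 := ⟨nb.toNat - 1, by omega⟩
      rw [hm, Function.iterate_succ_apply, hfirst, pvStepL_iter_mod]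
      have hk : PySem.Int.mod nb 4 = (((m + 1) % 4 : Nat) : Int) := by
        rw [hn, hm]; exact PySem.Int.mod_natCast _ _
      rw [hk]
      have h4 : (m + 1) % 4 = 0 ∨ (m + 1) % 4 = 1 ∨ (m + 1) % 4 = 2 ∨ (m + 1) % 4 = 3 := by omega
      rcases h4 with h | h | h | h
      · have hm4 : m % 4 = 3 := by omega
        rw [h, hm4]
        simp only [Function.iterate_succ_apply, Function.iterate_zero, id, pvStepL_pair]
        norm_num [pysem, hpos.not_ge, List.getElem_cons_succ, List.getElem_cons_zero, show (("L":String) = "R") = False by decide]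
        all_goals rfl
      · have hm4 : m % 4 = 0 := by omega
        rw [h, hm4]
        simp only [Function.iterate_zero, id]
        norm_num [pysem, hpos.not_ge, List.getElem_cons_succ, List.getElem_cons_zero, show (("L":String) = "R") = False by decide]
        all_goals rfl
      · have hm4 : m % 4 = 1 := by omega
        rw [h, hm4]
        simp only [Function.iterate_succ_apply, Function.iterate_zero, id, pvStepL_pair]
        norm_num [pysem, hpos.not_ge, List.getElem_cons_succ, List.getElem_cons_zero, show (("L":String) = "R") = False by decide]
        all_goals rfl
      · have hm4 : m % 4 = 2 := by omega
        rw [h, hm4]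
        simp only [Function.iterate_succ_apply, Function.iterate_zero, id, pvStepL_pair]
        norm_num [pysem, hpos.not_ge, List.getElem_cons_succ, List.getElem_cons_zero, show (("L":String) = "R") = False by decide]
        all_goals rfl
    · by_cases hRR : orientation = "R"
      · have hlen : 2 ≤ waypoint.length := hpre (Or.inr hRR) hamt
        obtain ⟨a, b, t, rfl⟩ : ∃ a b t, waypoint = a :: b :: t := by
          match waypoint, hlen with
          | a :: b :: t, _ => exact ⟨a, b, t, rfl⟩
        simp only [hRR, if_true, if_neg (by decide : ¬("R":String) = "L"),
          if_neg (by simp [hpos.not_ge] : ¬(¬(("R":String) = "L" ∨ ("R":String) = "R") ∨ nb ≤ 0))]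
        have hbody : (PySem.List.pyRange 0 nb 1).foldl (fun w _ => pvStepR w) (a :: b :: t)
            = pvStepR^[nb.toNat] (a :: b :: t) := by
          rw [pv_foldl_ignore]
          congr 1
          rw [PySem.List.length_pyRange_one]; omega
        show (PySem.List.pyRange 0 nb 1).foldl (fun w _ => pvStepR w) (a :: b :: t) = _
        rw [hbody]
        have hfirst : pvStepR (a :: b :: t) = [b, -a] := by simp [pvStepR, pysem]
        obtain ⟨m, hm⟩ : ∃ m, nb.toNat = m + 1 := ⟨nb.toNat - 1, by omega⟩
        rw [hm, Function.iterate_succ_apply, hfirst, pvStepR_iter_mod]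
        have hk : PySem.Int.mod nb 4 = (((m + 1) % 4 : Nat) : Int) := by
          rw [hn, hm]; exact PySem.Int.mod_natCast _ _
        rw [hk]
        have h4 : (m + 1) % 4 = 0 ∨ (m + 1) % 4 = 1 ∨ (m + 1) % 4 = 2 ∨ (m + 1) % 4 = 3 := by omega
        rcases h4 with h | h | h | h
        · have hm4 : m % 4 = 3 := by omega
          rw [h, hm4]
          simp only [Function.iterate_succ_apply, Function.iterate_zero, id, pvStepR_pair]
          norm_num [pysem, PySem.Int.mod, hpos.not_ge, List.getElem_cons_succ, List.getElem_cons_zero, show ((-1:Int).fmod 4) = 3 by decide, show ((-2:Int).fmod 4) = 2 by decide, show ((-3:Int).fmod 4) = 1 by decide, show ((0:Int).fmod 4) = 0 by decide]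
          all_goals rfl
        · have hm4 : m % 4 = 0 := by omega
          rw [h, hm4]
          simp only [Function.iterate_zero, id]
          norm_num [pysem, PySem.Int.mod, hpos.not_ge, List.getElem_cons_succ, List.getElem_cons_zero, show ((-1:Int).fmod 4) = 3 by decide, show ((-2:Int).fmod 4) = 2 by decide, show ((-3:Int).fmod 4) = 1 by decide, show ((0:Int).fmod 4) = 0 by decide]
          all_goals rfl
        · have hm4 : m % 4 = 1 := by omega
          rw [h, hm4]
          simp only [Function.iterate_succ_apply, Function.iterate_zero, id, pvStepR_pair]
          norm_num [pysem, PySem.Int.mod, hpos.not_ge, List.getElem_cons_succ, List.getElem_cons_zero, show ((-1:Int).fmod 4) = 3 by decide, show ((-2:Int).fmod 4) = 2 by decide, show ((-3:Int).fmod 4) = 1 by decide, show ((0:Int).fmod 4) = 0 by decide]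
          all_goals rfl
        · have hm4 : m % 4 = 2 := by omega
          rw [h, hm4]
          simp only [Function.iterate_succ_apply, Function.iterate_zero, id, pvStepR_pair]
          norm_num [pysem, PySem.Int.mod, hpos.not_ge, List.getElem_cons_succ, List.getElem_cons_zero, show ((-1:Int).fmod 4) = 3 by decide, show ((-2:Int).fmod 4) = 2 by decide, show ((-3:Int).fmod 4) = 1 by decide, show ((0:Int).fmod 4) = 0 by decide]
          all_goals rfl
      · simp [hL, hRR]
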